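-- pv_equiv track=rewrite | github.com/hjonghyeok/coding_trainning | 프로그래머스/기초테스트/2차원으로 만들기.py | solution
-- ===== SOURCE A (Python) =====
-- def solution(num_list, n):
--     answer = []
--     r = []
--     for i in range(len(num_list)):
--         r.append(num_list[i])
--         if len(r) == n:
--             answer.append(r)
--             r = []
--
--     return answer
-- ===== SOURCE B (Python) =====
-- def solution(num_list, n):
--     if n <= 0:
--         return []
--     out = []
--     i = 0
--     while i + n <= len(num_list):
--         out.append(num_list[i:i+n])
--         i += n
--     return out
-- ===== Notes on version B (the rewrite author's own statement) =====
-- stated objective: faster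
-- what changed: Replaces A's element-by-element accumulator loop with flush-on-full buffer by a while loop over chunk-start indices that slices off one complete n-chunk per iteration (n<=0 returns [] up front, matching A's silent empty result).
import Mathlib
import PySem

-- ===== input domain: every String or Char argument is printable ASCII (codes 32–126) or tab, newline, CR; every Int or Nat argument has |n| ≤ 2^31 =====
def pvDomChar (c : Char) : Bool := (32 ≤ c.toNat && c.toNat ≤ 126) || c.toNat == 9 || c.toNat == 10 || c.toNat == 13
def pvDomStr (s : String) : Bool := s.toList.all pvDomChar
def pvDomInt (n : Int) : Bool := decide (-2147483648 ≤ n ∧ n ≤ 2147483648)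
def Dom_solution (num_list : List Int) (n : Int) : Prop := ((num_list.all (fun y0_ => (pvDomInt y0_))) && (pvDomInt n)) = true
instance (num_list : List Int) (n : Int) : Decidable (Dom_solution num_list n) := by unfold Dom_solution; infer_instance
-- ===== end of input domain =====

-- B replaces A's element-by-element accumulator with a while loop slicing off one complete n-chunk per iteration (objective: faster, in a timing run's measurement).

-- ===== PORT A =====
-- loop body: r.append(num_list[i]); if len(r) == n: answer.append(r); r = []
def solutionStepA (n : Int) (s : List (List Int) × List Int) (x : Int) : List (List Int) × List Int :=
  let r := s.2 ++ [x]
  if (r.length : Int) = n then (s.1 ++ [r], []) else (s.1, r)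

def solution (num_list : List Int) (n : Int) : List (List Int) :=
  ((PySem.List.pyRange 0 (PySem.List.len num_list) 1).foldl
    (fun s i => solutionStepA n s (PySem.List.pyGetD num_list i 0)) ([], [])).1

-- ===== PORT B =====
-- the while loop 'while i + n <= len(num_list): out.append(num_list[i:i+n]); i += n';
-- the '0 < n' conjunct in the guard only makes the recursion total (the caller has already returned [] when n ≤ 0)
def solutionAltLoop (num_list : List Int) (n : Int) (i : Int) (out : List (List Int)) : List (List Int) :=
  if h : 0 < n ∧ i + n ≤ (num_list.length : Int) then
    solutionAltLoop num_list n (i + n) (out ++ [PySem.List.slice num_list (some i) (some (i + n))])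
  else out
termination_by ((num_list.length : Int) - i).toNat
decreasing_by omega

def solution_alt (num_list : List Int) (n : Int) : List (List Int) :=
  if n ≤ 0 then [] else solutionAltLoop num_list n 0 []

-- ===== PRECONDITION & SPEC =====
def Spec_solution (num_list : List Int) (n : Int) (out : List (List Int)) : Prop := out = solution_alt num_list n
instance (num_list : List Int) (n : Int) (out : List (List Int)) : Decidable (Spec_solution num_list n out) := by unfold Spec_solution; infer_instance

-- ===== CLAIM (what is proved, stated in full; the proofs are below) =====
def Claim_equal_solution : Prop := ∀ (num_list : List Int) (n : Int), Dom_solution num_list n → Spec_solution num_list n (solution num_list n)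

-- ===== LEMMAS AND PROOFS =====

-- proof-only midpoint: the chunks of l as a structural recursion (one complete chunk per step)
def chunksRec (l : List Int) (n : Int) : List (List Int) :=
  if h : n ≤ 0 ∨ (l.length : Int) < n then []
  else PySem.List.slice l none (some n) :: chunksRec (PySem.List.slice l (some n) none) n
termination_by l.length
decreasing_by
  push Not at h
  rw [PySem.List.slice_from _ (by omega)]
  simp only [List.length_drop]
  omega

lemma chunksRec_small (l : List Int) (n : Int) (h : n ≤ 0 ∨ (l.length : Int) < n) :
    chunksRec l n = [] := by
  rw [chunksRec]; exact dif_pos h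

lemma chunksRec_step (l : List Int) (n : Int) (hn : 0 < n) (hlen : n ≤ (l.length : Int)) :
    chunksRec l n = l.take n.toNat :: chunksRec (l.drop n.toNat) n := by
  rw [chunksRec, dif_neg (by omega)]
  rw [PySem.List.slice_to _ (by omega), PySem.List.slice_from _ (by omega)]

-- ---- A's loop computes chunksRec ----

-- when n ≤ 0 the flush condition len(r) == n never fires, so answer stays unchanged
lemma solution_loop_nonpos (n : Int) (hn : n ≤ 0) (l : List Int) :
    ∀ (acc : List (List Int)) (r : List Int),
      (l.foldl (solutionStepA n) (acc, r)).1 = acc := by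
  induction l with
  | nil => intro acc r; rfl
  | cons x l ih =>
    intro acc r
    simp only [List.foldl_cons, solutionStepA]
    rw [if_neg (by
      simp only [List.length_append, List.length_cons, List.length_nil]
      push_cast
      omega)]
    exact ih acc (r ++ [x])

lemma solution_loop_pos (n : Int) (hn : 0 < n) (l : List Int) :
    ∀ (acc : List (List Int)) (r : List Int), (r.length : Int) < n →
      (l.foldl (solutionStepA n) (acc, r)).1 = acc ++ chunksRec (r ++ l) n := by
  induction l with
  | nil =>
    intro acc r hr
    rw [List.append_nil, chunksRec_small r n (Or.inr hr)]
    simp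
  | cons x l ih =>
    intro acc r hr
    simp only [List.foldl_cons, solutionStepA]
    by_cases h : (((r ++ [x]).length : Int) = n)
    · rw [if_pos h, ih (acc ++ [r ++ [x]]) [] (by simpa using hn)]
      have hsplit : r ++ x :: l = (r ++ [x]) ++ l := by simp
      rw [hsplit, chunksRec_step ((r ++ [x]) ++ l) n hn
        (by simp only [List.length_append, List.length_cons, List.length_nil] at h ⊢
            push_cast at h ⊢; omega)]
      have ht : n.toNat = (r ++ [x]).length := by push_cast at h; omega
      rw [ht, List.take_left, List.drop_left]
      simp
    · rw [if_neg h]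
      have hr' : (((r ++ [x]).length : Int)) < n := by
        simp only [List.length_append, List.length_cons, List.length_nil] at h ⊢
        push_cast at h hr ⊢
        omega
      rw [ih acc (r ++ [x]) hr']
      simp

-- ---- B's while loop computes chunksRec ----

lemma solution_alt_loop_eq (n : Int) (hn : 0 < n) :
    ∀ (m : Nat) (l : List Int) (i : Nat) (out : List (List Int)), l.length ≤ i + m →
      solutionAltLoop l n (i : Int) out = out ++ chunksRec (l.drop i) n := by
  intro m
  induction m with
  | zero =>
    intro l i out hm
    rw [solutionAltLoop, dif_neg (by push_cast; omega)]
    rw [chunksRec_small (l.drop i) n (Or.inr (by simp only [List.length_drop]; omega))]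
    simp
  | succ m ih =>
    intro l i out hm
    by_cases hg : (i : Int) + n ≤ (l.length : Int)
    · rw [solutionAltLoop, dif_pos ⟨hn, hg⟩]
      have hi : (i : Int) + n = ((i + n.toNat : Nat) : Int) := by push_cast; omega
      rw [hi, ih l (i + n.toNat) _ (by omega)]
      have hslice : PySem.List.slice l (some (i : Int)) (some ((i + n.toNat : Nat) : Int))
          = (l.drop i).take n.toNat := by
        simp only [PySem.List.slice_natCast, Nat.add_sub_cancel_left]
      have hc : chunksRec (l.drop i) n = (l.drop i).take n.toNat :: chunksRec (l.drop (i + n.toNat)) n := by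
        rw [chunksRec_step (l.drop i) n hn (by simp only [List.length_drop]; omega)]
        rw [List.drop_drop]
      rw [hslice, hc]
      simp
    · rw [solutionAltLoop, dif_neg (by push Not; intro _; omega)]
      rw [chunksRec_small (l.drop i) n (Or.inr (by simp only [List.length_drop]; omega))]
      simp

lemma solution_alt_eq_chunksRec (l : List Int) (n : Int) : solution_alt l n = chunksRec l n := by
  unfold solution_alt
  by_cases hn : n ≤ 0
  · rw [if_pos hn, chunksRec_small l n (Or.inl hn)]
  · rw [if_neg hn]
    have := solution_alt_loop_eq n (by omega) l.length l 0 [] (by omega)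
    simpa using this

-- ===== VERDICT (by name: the statement is the Claim_ definition above) =====
theorem solution_spec : Claim_equal_solution := by
  intro num_list n _
  unfold Spec_solution solution
  rw [PySem.List.foldl_pyRange_zero_pyGetD num_list 0 (solutionStepA n) ([], []),
    solution_alt_eq_chunksRec]
  by_cases hn : 0 < n
  · rw [solution_loop_pos n hn num_list [] [] (by simpa using hn)]
    simp
  · rw [solution_loop_nonpos n (by omega) num_list [] []]
    rw [chunksRec_small num_list n (Or.inl (by omega))]
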